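-- pv_equiv track=rewrite | github.com/JJamali/Hand-Gesture-Detector | python/useful_functions.py | determine_sign
-- ===== SOURCE A (Python) =====
-- def determine_sign(data):
--
--     left_found = False
--     right_found = True
--
--     # if we detect nothing on the 5th row, just return rock
--     if not max(data[5]):
--         return "rock"
--
--     for i in data[5]:
--         if i and not left_found:
--             left_found = True
--
--         elif not i and left_found:
--             right_found = True
--
--         elif i and right_found:
--             # found changing from air to finger after finding a full solid body (1 finger)
--             return "scissors"
--
--         # if right found and not i, do nothing.
--
--     if right_found:
--         return "paper"
--
--     else:
--         return "inconclusive"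
-- ===== SOURCE B (Python) =====
-- def determine_sign(data):
--     # same guard as A: max-falsy (max == 0) means "rock"; empty row still raises ValueError
--     if not max(data[5]):
--         return "rock"
--     n = sum(1 for x in data[5] if x)
--     return "scissors" if n >= 2 else "paper"
-- ===== Notes on version B (the rewrite author's own statement) =====
-- stated objective: simpler
-- what changed: Replaced A's two-flag state machine with early return by a single count of truthy detections compared against a threshold (>= 2 means scissors, else paper), keeping the max-falsy rock guard.
import Mathlib
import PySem

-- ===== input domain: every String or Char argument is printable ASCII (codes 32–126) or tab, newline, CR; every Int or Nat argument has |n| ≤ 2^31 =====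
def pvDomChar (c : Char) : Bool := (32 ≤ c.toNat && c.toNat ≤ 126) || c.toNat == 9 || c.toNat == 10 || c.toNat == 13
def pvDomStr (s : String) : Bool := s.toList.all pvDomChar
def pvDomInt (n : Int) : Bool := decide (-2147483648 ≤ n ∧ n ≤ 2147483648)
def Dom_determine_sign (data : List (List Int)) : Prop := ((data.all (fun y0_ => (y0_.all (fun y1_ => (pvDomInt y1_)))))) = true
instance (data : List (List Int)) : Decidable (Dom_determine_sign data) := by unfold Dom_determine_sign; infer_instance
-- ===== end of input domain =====

-- B replaces A's two-flag state machine with a count-then-threshold decision (simpler decomposition; same O(n) cost).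


-- ===== PORT A =====
-- the for-loop over data[5] with the two flags and the early "scissors" return
def determineSignLoopA : List Int → Bool → Bool → String
  | [], _, right_found => if right_found then "paper" else "inconclusive"
  | i :: rest, left_found, right_found =>
    if i ≠ 0 ∧ ¬ left_found then determineSignLoopA rest true right_found
    else if i = 0 ∧ left_found then determineSignLoopA rest left_found true
    else if i ≠ 0 ∧ right_found then "scissors"
    else determineSignLoopA rest left_found right_found

def determine_sign (data : List (List Int)) : String :=
  match PySem.List.pyGet? data 5 with
  | none => ""          -- IndexError: excluded by Pre_
  | some row =>
    match PySem.List.max? row (fun y => y) with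
    | none => ""        -- ValueError on max([]): excluded by Pre_
    | some m =>
      if m = 0 then "rock"
      else determineSignLoopA row false true

-- ===== PORT B =====
def determine_sign_alt (data : List (List Int)) : String :=
  match PySem.List.pyGet? data 5 with
  | none => ""          -- IndexError: excluded by Pre_
  | some row =>
    match PySem.List.max? row (fun y => y) with
    | none => ""        -- ValueError on max([]): excluded by Pre_
    | some m =>
      if m = 0 then "rock"
      else
        -- n = sum(1 for x in data[5] if x)
        let n : Int := row.foldl (fun acc x => if x ≠ 0 then acc + 1 else acc) 0
        if n ≥ 2 then "scissors" else "paper"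

-- ===== PRECONDITION & SPEC =====
-- Pre_ excludes exactly the inputs where A raises: IndexError when data has no row 5, ValueError from max on an empty row.
def Pre_determine_sign (data : List (List Int)) : Prop :=
  5 < data.length ∧ data.getD 5 [] ≠ []
instance (data : List (List Int)) : Decidable (Pre_determine_sign data) := by
  unfold Pre_determine_sign; infer_instance
def pvWitness_determine_sign : List (List Int) := [[0], [0], [0], [0], [0], [1, 0, 1]]

def Spec_determine_sign (data : List (List Int)) (out : String) : Prop := out = determine_sign_alt data
instance (data : List (List Int)) (out : String) : Decidable (Spec_determine_sign data out) := by unfold Spec_determine_sign; infer_instance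

-- ===== CLAIM (what is proved, stated in full; the proofs are below) =====
def Claim_equal_determine_sign : Prop := ∀ (data : List (List Int)), Dom_determine_sign data → Pre_determine_sign data → Spec_determine_sign data (determine_sign data)

-- ===== LEMMAS AND PROOFS =====

-- A's loop (with right_found = true, which it always is) decides by the number of nonzero entries
lemma loopA_count (row : List Int) (lf : Bool) :
    determineSignLoopA row lf true =
      if row.countP (fun x => x ≠ 0) + (if lf then 1 else 0) ≥ 2 then "scissors" else "paper" := by
  induction row generalizing lf with
  | nil => cases lf <;> simp [determineSignLoopA]
  | cons i rest ih =>
    by_cases hi : i = 0 <;> cases lf <;>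
      simp [determineSignLoopA, hi, ih]

-- B's fold computes the same count
lemma foldl_count (row : List Int) (acc : Int) :
    row.foldl (fun acc x => if x ≠ 0 then acc + 1 else acc) acc
      = acc + (row.countP (fun x => x ≠ 0) : Int) := by
  induction row generalizing acc with
  | nil => simp
  | cons i rest ih =>
    rw [List.foldl_cons, ih, List.countP_cons]
    by_cases hi : i = 0 <;> simp [hi] <;> ring

-- ===== VERDICT (by name: the statement is the Claim_ definition above) =====
theorem determine_sign_spec : Claim_equal_determine_sign := by
  intro data _ _
  unfold Spec_determine_sign determine_sign determine_sign_alt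
  cases hget : PySem.List.pyGet? data 5 with
  | none => simp
  | some row =>
    cases hm : PySem.List.max? row (fun y => y) with
    | none => simp [hm]
    | some m =>
      by_cases h0 : m = 0
      · simp [hm, h0]
      · simp only [hm]
        rw [if_neg h0, if_neg h0]
        have hc := loopA_count row false
        simp only [Bool.false_eq_true, if_false, Nat.add_zero] at hc
        rw [hc, foldl_count]
        split_ifs with h1 h2 <;> first | rfl | (exfalso; omega)
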